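-- pv_equiv track=rewrite | github.com/springin98/Algorithm | msdio/python/pg_140108.py | solution
-- ===== SOURCE A (Python) =====
-- def solution(s):
--     cur = ''
--     cur_cnt = 0
--     others = 0
--
--     ans = 0
--     for cand in s:
--         if cur == '':
--             cur = cand
--             cur_cnt = 1
--             continue
--
--         if cur == cand:
--             cur_cnt += 1
--         else:
--             others += 1
--
--         if cur_cnt == others:
--             ans += 1
--             cur = ''
--             cur_cnt = 0
--             others = 0
--
--     if cur:
--         return ans+1
--     else:
--         return ans
-- ===== SOURCE B (Python) =====
-- def solution(s):
--     # Pass 1: run-length encode the string into (char, length) runs.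
--     # Pass 2: fold over the runs with whole-run arithmetic: a run either opens a
--     # segment (balance = run length), extends it, or drains the balance; when a
--     # foreign run drains the balance to 0 the segment closes and any leftover of
--     # that run opens the next segment. Each opened segment counts once.
--     runs = []
--     for ch in s:
--         if runs and runs[-1][0] == ch:
--             runs[-1][1] += 1
--         else:
--             runs.append([ch, 1])
--     ans = 0
--     cur = None
--     bal = 0
--     for d, L in runs:
--         if cur is None:
--             ans += 1
--             cur = d
--             bal = L
--         elif d == cur:
--             bal += L
--         elif L >= bal:
--             L -= bal
--             cur = None
--             bal = 0
--             if L > 0: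
--                 ans += 1
--                 cur = d
--                 bal = L
--         else:
--             bal -= L
--     return ans
-- ===== Notes on version B (the rewrite author's own statement) =====
-- stated objective: alternative
-- what changed: Replaced A's single character-by-character fold over (sentinel char, two counters) by two staged passes: first run-length encode the string, then fold over the runs with whole-run arithmetic (a run opens, extends, or drains a segment's balance in one step).
import Mathlib
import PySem

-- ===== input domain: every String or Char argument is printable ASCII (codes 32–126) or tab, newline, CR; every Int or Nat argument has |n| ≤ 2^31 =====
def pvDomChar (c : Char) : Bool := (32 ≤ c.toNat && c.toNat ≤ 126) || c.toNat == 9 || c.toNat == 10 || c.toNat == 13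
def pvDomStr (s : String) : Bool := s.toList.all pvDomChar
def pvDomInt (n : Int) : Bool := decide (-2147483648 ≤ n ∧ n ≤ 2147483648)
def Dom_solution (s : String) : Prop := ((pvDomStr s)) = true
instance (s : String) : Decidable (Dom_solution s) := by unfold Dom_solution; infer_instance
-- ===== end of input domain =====

-- B replaces A's char-by-char fold over (sentinel, two counters) by two staged
-- passes: run-length encode, then a fold over runs with whole-run arithmetic
-- (alternative decomposition, same asymptotic cost).

-- ===== PORT A =====
-- Python's '' sentinel for `cur` is modeled as `none`, a one-char string as `some c`.
def solutionStep (st : Option Char × Int × Int × Int) (cand : Char) :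
    Option Char × Int × Int × Int :=
  let (cur, curCnt, others, ans) := st
  match cur with
  | none => (some cand, 1, others, ans)
  | some c =>
    let curCnt' := if c == cand then curCnt + 1 else curCnt
    let others' := if c == cand then others else others + 1
    if curCnt' == others' then (none, 0, 0, ans + 1)
    else (some c, curCnt', others', ans)

def solution (s : String) : Int :=
  match s.toList.foldl solutionStep (none, 0, 0, 0) with
  | (some _, _, _, ans) => ans + 1
  | (none, _, _, ans) => ans

-- ===== PORT B =====
-- pass 1 of Source B: run-length encoding; Python appends/mutates the LAST run, so
-- the accumulator holds the runs reversed (head = last run) and is reversed at the end.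
def rleAux (acc : List (Char × Int)) (ch : Char) : List (Char × Int) :=
  match acc with
  | [] => [(ch, 1)]
  | (c, n) :: rest => if c == ch then (c, n + 1) :: rest else (ch, 1) :: (c, n) :: rest

def rle (l : List Char) : List (Char × Int) := (l.foldl rleAux []).reverse

-- pass 2 of Source B: one fold step per run over the state (ans, cur, bal)
def segStep (st : Int × Option Char × Int) (r : Char × Int) : Int × Option Char × Int :=
  let (ans, cur, bal) := st
  let (d, L) := r
  match cur with
  | none => (ans + 1, some d, L)
  | some c =>
    if d == c then (ans, some c, bal + L)
    else if L ≥ bal then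
      let L' := L - bal
      if L' > 0 then (ans + 1, some d, L') else (ans, none, 0)
    else (ans, some c, bal - L)

def solution_alt (s : String) : Int :=
  ((rle s.toList).foldl segStep (0, none, 0)).1

-- ===== PRECONDITION & SPEC =====
def Spec_solution (s : String) (out : Int) : Prop := out = solution_alt s
instance (s : String) (out : Int) : Decidable (Spec_solution s out) := by unfold Spec_solution; infer_instance

-- ===== CLAIM (what is proved, stated in full; the proofs are below) =====
def Claim_equal_solution : Prop := ∀ (s : String), Dom_solution s → Spec_solution s (solution s)

-- ===== LEMMAS AND PROOFS =====

-- flatten a run list back to characters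
def flatRuns (runs : List (Char × Int)) : List Char :=
  runs.flatMap (fun r => List.replicate r.2.toNat r.1)

-- the final return of A's code from a fold state
def solutionFinish (st : Option Char × Int × Int × Int) : Int :=
  match st with
  | (some _, _, _, ans) => ans + 1
  | (none, _, _, ans) => ans

-- relation between A's fold state and B's fold state: when a segment is open,
-- B's balance is A's (cnt - oth) and B's ans already counts the open segment
def Rinv (a : Option Char × Int × Int × Int) (b : Int × Option Char × Int) : Prop :=
  match a, b with
  | (none, cnt, oth, ansA), (ansB, cur, bal) =>
      cnt = 0 ∧ oth = 0 ∧ cur = none ∧ bal = 0 ∧ ansB = ansA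
  | (some c, cnt, oth, ansA), (ansB, cur, bal) =>
      cur = some c ∧ bal = cnt - oth ∧ oth < cnt ∧ ansB = ansA + 1

-- A's fold over a block of chars equal to the open segment's char
theorem foldA_same (c : Char) (cnt oth ansA : Int) (h : oth < cnt) (k : Nat) :
    (List.replicate k c).foldl solutionStep (some c, cnt, oth, ansA)
      = (some c, cnt + k, oth, ansA) := by
  induction k generalizing cnt with
  | zero => simp
  | succ m ih =>
    rw [List.replicate_succ, List.foldl_cons]
    show (List.replicate m c).foldl solutionStep (solutionStep (some c, cnt, oth, ansA) c) = _
    simp only [solutionStep, beq_self_eq_true, if_true]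
    rw [show ((cnt + 1 : Int) == oth) = false by simp only [beq_eq_false_iff_ne, ne_eq]; omega]
    simp only [Bool.false_eq_true, if_false]
    rw [ih (cnt + 1) (by omega)]
    simp only [Prod.mk.injEq, true_and, and_true]
    push_cast; omega

-- A's fold over a block of k ≥ 1 chars c from the fresh (reset) state
theorem foldA_fresh (c : Char) (ansA : Int) (k : Nat) (hk : 1 ≤ k) :
    (List.replicate k c).foldl solutionStep (none, 0, 0, ansA)
      = (some c, (k : Int), 0, ansA) := by
  obtain ⟨m, rfl⟩ : ∃ m, k = m + 1 := ⟨k - 1, by omega⟩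
  rw [List.replicate_succ, List.foldl_cons]
  show (List.replicate m c).foldl solutionStep (solutionStep (none, 0, 0, ansA) c) = _
  simp only [solutionStep]
  rw [foldA_same c 1 0 ansA (by norm_num) m]
  simp only [Prod.mk.injEq, true_and, and_true]
  push_cast; omega

-- A's fold over a block of chars d ≠ c while segment (c, cnt, oth) is open
theorem foldA_diff (c d : Char) (hcd : ¬ c = d) (k : Nat) (cnt oth ansA : Int)
    (h : oth < cnt) :
    (List.replicate k d).foldl solutionStep (some c, cnt, oth, ansA)
      = if (k : Int) < cnt - oth then (some c, cnt, oth + k, ansA)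
        else if (k : Int) = cnt - oth then (none, 0, 0, ansA + 1)
        else (some d, (k : Int) - (cnt - oth), 0, ansA + 1) := by
  induction k generalizing oth with
  | zero =>
    simp only [List.replicate_zero, List.foldl_nil, Nat.cast_zero]
    rw [if_pos (by omega)]
    simp
  | succ m ih =>
    rw [List.replicate_succ, List.foldl_cons]
    show (List.replicate m d).foldl solutionStep (solutionStep (some c, cnt, oth, ansA) d) = _
    simp only [solutionStep, show (c == d) = false by simp [hcd], Bool.false_eq_true, if_false]
    by_cases hz : cnt = oth + 1
    · rw [show ((cnt : Int) == oth + 1) = true by simp [hz]]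
      simp only [if_true]
      by_cases hm : m = 0
      · subst hm
        simp only [List.replicate_zero, List.foldl_nil]
        rw [if_neg (by push_cast; omega), if_pos (by push_cast; omega)]
      · rw [foldA_fresh d (ansA + 1) m (by omega)]
        rw [if_neg (by push_cast; omega), if_neg (by push_cast; omega)]
        simp only [Prod.mk.injEq, true_and, and_true]
        push_cast; omega
    · rw [show ((cnt : Int) == oth + 1) = false by
        simp only [beq_eq_false_iff_ne, ne_eq]; omega]
      simp only [Bool.false_eq_true, if_false]
      rw [ih (oth + 1) (by omega)]
      push_cast
      split_ifs <;> first
        | (exfalso; omega)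
        | rfl
        | (simp only [Prod.mk.injEq, true_and, and_true]; omega)

-- one run preserves the invariant
theorem step_run (a : Option Char × Int × Int × Int) (b : Int × Option Char × Int)
    (hR : Rinv a b) (d : Char) (L : Int) (hL : 1 ≤ L) :
    Rinv ((List.replicate L.toNat d).foldl solutionStep a) (segStep b (d, L)) := by
  obtain ⟨curA, cnt, oth, ansA⟩ := a
  obtain ⟨ansB, curB, bal⟩ := b
  have hLnat : ((L.toNat : Nat) : Int) = L := by omega
  cases curA with
  | none =>
    obtain ⟨h1, h2, h3, h4, h5⟩ := hR
    subst h1; subst h2; subst h3; subst h4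
    rw [foldA_fresh d ansA L.toNat (by omega)]
    simp only [segStep, Rinv, true_and]
    omega
  | some c =>
    obtain ⟨h1, h2, h3, h4⟩ := hR
    subst h1; subst h2; subst h4
    by_cases hdc : d = c
    · subst hdc
      rw [foldA_same d cnt oth ansA h3 L.toNat]
      simp only [segStep, beq_self_eq_true, if_true, Rinv, true_and, and_true]
      omega
    · rw [foldA_diff c d (fun h => hdc h.symm) L.toNat cnt oth ansA h3]
      simp only [segStep, show (d == c) = false by simp [hdc], Bool.false_eq_true, if_false,
        hLnat, ge_iff_le, gt_iff_lt]
      split_ifs <;> first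
        | (exfalso; omega)
        | (simp only [Rinv, true_and, and_true]; omega)
        | (simp [Rinv])

-- folding over a whole run list preserves the invariant
theorem fold_runs (runs : List (Char × Int)) (hruns : ∀ r ∈ runs, 1 ≤ r.2)
    (a : Option Char × Int × Int × Int) (b : Int × Option Char × Int) (hR : Rinv a b) :
    Rinv ((flatRuns runs).foldl solutionStep a) (runs.foldl segStep b) := by
  induction runs generalizing a b with
  | nil => simpa [flatRuns] using hR
  | cons r rest ih =>
    obtain ⟨d, L⟩ := r
    have hflat : flatRuns ((d, L) :: rest) = List.replicate L.toNat d ++ flatRuns rest := by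
      simp [flatRuns]
    rw [hflat, List.foldl_append, List.foldl_cons]
    exact ih (fun r hr => hruns r (List.mem_cons_of_mem _ hr)) _ _
      (step_run _ _ hR d L (hruns (d, L) (List.mem_cons_self)))

-- the RLE pass is faithful: flattening the runs gives back the list, counts ≥ 1
theorem rleAux_inv (l : List Char) (acc : List (Char × Int))
    (hacc : ∀ r ∈ acc, 1 ≤ r.2) :
    flatRuns (l.foldl rleAux acc).reverse = flatRuns acc.reverse ++ l ∧
      ∀ r ∈ l.foldl rleAux acc, 1 ≤ r.2 := by
  induction l generalizing acc with
  | nil => exact ⟨by simp, hacc⟩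
  | cons ch rest ih =>
    rw [List.foldl_cons]
    have key : flatRuns (rleAux acc ch).reverse = flatRuns acc.reverse ++ [ch] ∧
        ∀ r ∈ rleAux acc ch, 1 ≤ r.2 := by
      match acc with
      | [] =>
        refine ⟨by simp [rleAux, flatRuns], ?_⟩
        intro r hr; simp [rleAux] at hr; subst hr; norm_num
      | (c, n) :: tail =>
        have hn : 1 ≤ n := hacc (c, n) (List.mem_cons_self)
        simp only [rleAux]
        by_cases hc : c = ch
        · subst hc
          rw [if_pos (by simp)]
          refine ⟨?_, ?_⟩
          · simp only [flatRuns, List.reverse_cons, List.flatMap_append, List.flatMap_cons,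
              List.flatMap_nil, List.append_nil, List.append_assoc]
            congr 1
            rw [show (n + 1).toNat = n.toNat + 1 by omega, List.replicate_succ']
          · intro r hr
            rcases List.mem_cons.1 hr with h | h
            · subst h; omega
            · exact hacc r (List.mem_cons_of_mem _ h)
        · rw [if_neg (by simp [hc])]
          refine ⟨?_, ?_⟩
          · simp [flatRuns]
          · intro r hr
            rcases List.mem_cons.1 hr with h | h
            · subst h; norm_num
            · exact hacc r h
    have hrec := ih (rleAux acc ch) key.2
    refine ⟨?_, hrec.2⟩
    rw [hrec.1, key.1, List.append_assoc]
    rfl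

theorem rle_flat (l : List Char) : flatRuns (rle l) = l := by
  simpa [flatRuns] using (rleAux_inv l [] (by simp)).1

theorem rle_pos (l : List Char) : ∀ r ∈ rle l, 1 ≤ r.2 := by
  intro r hr
  exact (rleAux_inv l [] (by simp)).2 r (List.mem_reverse.1 hr)

-- ===== VERDICT (by name: the statement is the Claim_ definition above) =====
theorem solution_spec : Claim_equal_solution := by
  intro s _
  unfold Spec_solution solution solution_alt
  have h := fold_runs (rle s.toList) (rle_pos s.toList) (none, 0, 0, 0) (0, none, 0)
    (by simp [Rinv])
  rw [rle_flat] at h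
  obtain ⟨⟨cur, cnt, oth, ansA⟩, hA⟩ :
      ∃ x, s.toList.foldl solutionStep (none, 0, 0, 0) = x := ⟨_, rfl⟩
  obtain ⟨⟨ansB, curB, bal⟩, hB⟩ :
      ∃ x, (rle s.toList).foldl segStep (0, none, 0) = x := ⟨_, rfl⟩
  rw [hA, hB] at h ⊢
  cases cur with
  | none => simp only [Rinv] at h; exact h.2.2.2.2.symm
  | some c => simp only [Rinv] at h; exact h.2.2.2.symm
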